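-- pv_equiv track=rewrite | github.com/randyklein99/exercise | routine.py | is_non_synergistic
-- ===== SOURCE A (Python) =====
-- def is_non_synergistic(set_structure, exercises):
--     muscle_groups = set()
--     for exercise in set_structure:
--         primary = exercises[exercise].get("primary", [])
--         muscle_groups.update(primary)
--     return len(muscle_groups) == sum(
--         1 for exercise in set_structure for _ in exercises[exercise].get("primary", [])
--     )
-- ===== SOURCE B (Python) =====
-- def is_non_synergistic(set_structure, exercises):
--     seen = set()
--     for exercise in set_structure:
--         for muscle in exercises[exercise].get("primary", []):
--             if muscle in seen:
--                 return False
--             seen.add(muscle)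
--     return True
-- ===== Notes on version B (the rewrite author's own statement) =====
-- stated objective: alternative
-- what changed: Replaced A's two-pass 'build the union set, count all primaries, compare sizes' with a single incremental scan that keeps a 'seen' set and returns False the moment a duplicate primary muscle appears.
import Mathlib
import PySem

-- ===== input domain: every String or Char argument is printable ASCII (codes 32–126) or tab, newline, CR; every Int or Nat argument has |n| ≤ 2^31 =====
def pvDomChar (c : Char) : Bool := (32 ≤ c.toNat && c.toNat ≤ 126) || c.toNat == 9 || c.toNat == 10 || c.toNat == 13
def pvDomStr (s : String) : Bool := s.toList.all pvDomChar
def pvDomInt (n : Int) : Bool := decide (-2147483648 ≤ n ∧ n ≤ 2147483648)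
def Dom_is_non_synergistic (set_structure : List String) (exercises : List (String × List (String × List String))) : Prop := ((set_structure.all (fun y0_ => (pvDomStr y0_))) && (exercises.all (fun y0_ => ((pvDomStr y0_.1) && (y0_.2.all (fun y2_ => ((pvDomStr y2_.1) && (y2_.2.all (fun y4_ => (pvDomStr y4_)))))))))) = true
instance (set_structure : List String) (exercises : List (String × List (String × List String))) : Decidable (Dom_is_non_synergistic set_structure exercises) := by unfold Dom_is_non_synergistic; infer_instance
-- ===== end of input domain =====

-- B changes A's two-pass "build the union set, count all primaries, compare sizes"
-- into one short-circuiting scan with a 'seen' set; equivalence of the return values is proved on Pre_.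

-- ===== PORT A =====
-- exercises[exercise].get("primary", []) — dict lookup is first match in the association list;
-- a missing exercise key is a Python KeyError, excluded by Pre_ (the port returns [] there).
def pvGetPrimary (exercises : List (String × List (String × List String))) (e : String) : List String :=
  match exercises.find? (fun p => p.1 == e) with
  | some p =>
    match p.2.find? (fun q => q.1 == "primary") with
    | some q => q.2
    | none => []
  | none => []

def is_non_synergistic (set_structure : List String) (exercises : List (String × List (String × List String))) : Bool :=
  let muscle_groups : PySem.Set String :=
    set_structure.foldl (fun s e => PySem.Set.update s (pvGetPrimary exercises e)) PySem.Set.empty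
  let total : Nat :=
    set_structure.foldl (fun n e => (pvGetPrimary exercises e).foldl (fun n _ => n + 1) n) 0
  muscle_groups.length == total

-- ===== PORT B =====
-- inner loop: add each muscle to 'seen'; 'none' signals the early 'return False'
def pvScanMuscles (seen : PySem.Set String) : List String → Option (PySem.Set String)
  | [] => some seen
  | m :: ms =>
    if PySem.Set.contains seen m then none
    else pvScanMuscles (PySem.Set.add seen m) ms

def pvScanExercises (exercises : List (String × List (String × List String)))
    (seen : PySem.Set String) : List String → Bool
  | [] => true
  | e :: rest =>
    match pvScanMuscles seen (pvGetPrimary exercises e) with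
    | none => false
    | some seen' => pvScanExercises exercises seen' rest

def is_non_synergistic_alt (set_structure : List String) (exercises : List (String × List (String × List String))) : Bool :=
  pvScanExercises exercises PySem.Set.empty set_structure

-- ===== PRECONDITION & SPEC =====
-- Pre_ excludes exactly the inputs where Python raises KeyError: an exercise name absent from 'exercises'.
def Pre_is_non_synergistic (set_structure : List String) (exercises : List (String × List (String × List String))) : Prop :=
  ∀ e ∈ set_structure, e ∈ exercises.map Prod.fst
instance (set_structure : List String) (exercises : List (String × List (String × List String))) : Decidable (Pre_is_non_synergistic set_structure exercises) := by unfold Pre_is_non_synergistic; infer_instance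

def pvWitness_is_non_synergistic : List String × (List (String × List (String × List String))) :=
  (["a", "b"], [("a", [("primary", ["chest"])]), ("b", [("primary", ["back"]), ("secondary", ["chest"])])])

def Spec_is_non_synergistic (set_structure : List String) (exercises : List (String × List (String × List String))) (out : Bool) : Prop := out = is_non_synergistic_alt set_structure exercises
instance (set_structure : List String) (exercises : List (String × List (String × List String))) (out : Bool) : Decidable (Spec_is_non_synergistic set_structure exercises out) := by unfold Spec_is_non_synergistic; infer_instance

-- ===== CLAIM (what is proved, stated in full; the proofs are below) =====
def Claim_equal_is_non_synergistic : Prop := ∀ (set_structure : List String) (exercises : List (String × List (String × List String))), Dom_is_non_synergistic set_structure exercises → Pre_is_non_synergistic set_structure exercises → Spec_is_non_synergistic set_structure exercises (is_non_synergistic set_structure exercises)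

-- ===== LEMMAS AND PROOFS =====

-- A's set grows by at most one element per added muscle
theorem pv_foldl_add_len_le (l : List String) (s : PySem.Set String) :
    (l.foldl PySem.Set.add s).length ≤ s.length + l.length := by
  induction l generalizing s with
  | nil => simp
  | cons m ms ih =>
    simp only [List.foldl_cons]
    refine (ih (PySem.Set.add s m)).trans ?_
    simp only [List.length_cons]
    by_cases hm : m ∈ s
    · rw [PySem.Set.add_of_mem hm]; omega
    · rw [PySem.Set.add_of_not_mem hm]; simp only [List.length_append, List.length_cons, List.length_nil]; omega

-- B's inner scan succeeds iff every muscle of the chunk was fresh, i.e. the set grew by the full chunk length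
theorem pv_scan_flat (l : List String) (s : PySem.Set String) :
    pvScanMuscles s l = some (l.foldl PySem.Set.add s) ∧
      (l.foldl PySem.Set.add s).length = s.length + l.length ∨
    pvScanMuscles s l = none ∧
      (l.foldl PySem.Set.add s).length < s.length + l.length := by
  induction l generalizing s with
  | nil => simp [pvScanMuscles]
  | cons m ms ih =>
    simp only [pvScanMuscles, List.foldl_cons, List.length_cons]
    by_cases hm : m ∈ s
    · right
      have hc : PySem.Set.contains s m = true := (PySem.Set.contains_iff s m).mpr hm
      rw [hc, if_pos rfl, PySem.Set.add_of_mem hm]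
      have := pv_foldl_add_len_le ms s
      exact ⟨rfl, by omega⟩
    · have hc : PySem.Set.contains s m = false := by
        cases hcc : PySem.Set.contains s m
        · rfl
        · exact absurd ((PySem.Set.contains_iff s m).mp hcc) hm
      have hadd : (PySem.Set.add s m).length = s.length + 1 := by
        rw [PySem.Set.add_of_not_mem hm]; simp
      rw [hc]
      simp only [Bool.false_eq_true, if_false]
      rcases ih (PySem.Set.add s m) with ⟨h1, h2⟩ | ⟨h1, h2⟩
      · left; rw [h1]; exact ⟨rfl, by omega⟩
      · right; rw [h1]; exact ⟨rfl, by omega⟩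

-- the generator sum counts one per muscle
theorem pv_count_foldl (l : List String) (n : Nat) :
    l.foldl (fun n _ => n + 1) n = n + l.length := by
  induction l generalizing n with
  | nil => simp
  | cons m ms ih => simp [List.foldl_cons, ih]; omega

-- closed form of A's counting loop
theorem pv_count_closed (exercises : List (String × List (String × List String)))
    (l : List String) (k : Nat) :
    l.foldl (fun n e => (pvGetPrimary exercises e).foldl (fun n _ => n + 1) n) k
      = k + (l.map (fun e => (pvGetPrimary exercises e).length)).sum := by
  induction l generalizing k with
  | nil => simp
  | cons e rest ih =>
    simp only [List.foldl_cons, List.map_cons, List.sum_cons]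
    rw [pv_count_foldl, ih]
    omega

-- upper bound on the size of A's union set
theorem pv_set_bound (exercises : List (String × List (String × List String)))
    (l : List String) (t : PySem.Set String) :
    (l.foldl (fun t e => PySem.Set.update t (pvGetPrimary exercises e)) t).length
      ≤ t.length + (l.map (fun e => (pvGetPrimary exercises e).length)).sum := by
  induction l generalizing t with
  | nil => simp
  | cons e rest ih =>
    simp only [List.foldl_cons, List.map_cons, List.sum_cons]
    refine (ih _).trans ?_
    have h := pv_foldl_add_len_le (pvGetPrimary exercises e) t
    have hupd : PySem.Set.update t (pvGetPrimary exercises e)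
        = (pvGetPrimary exercises e).foldl PySem.Set.add t := rfl
    rw [hupd]; omega

-- main invariant: B's loop returns true iff A's set size equals A's count, from any common start
theorem pv_main (exercises : List (String × List (String × List String)))
    (ss : List String) (s : PySem.Set String) (n : Nat) (hn : n = s.length) :
    pvScanExercises exercises s ss =
      ((ss.foldl (fun t e => PySem.Set.update t (pvGetPrimary exercises e)) s).length
        == ss.foldl (fun n e => (pvGetPrimary exercises e).foldl (fun n _ => n + 1) n) n) := by
  induction ss generalizing s n with
  | nil => simp [pvScanExercises, hn]
  | cons e rest ih =>
    simp only [pvScanExercises, List.foldl_cons]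
    have hupd : PySem.Set.update s (pvGetPrimary exercises e)
        = (pvGetPrimary exercises e).foldl PySem.Set.add s := rfl
    rw [pv_count_foldl]
    rcases pv_scan_flat (pvGetPrimary exercises e) s with ⟨h1, h2⟩ | ⟨h1, h2⟩
    · rw [h1, hupd]
      exact ih _ _ (by omega)
    · rw [h1]
      have hb := pv_set_bound exercises rest (PySem.Set.update s (pvGetPrimary exercises e))
      have hc := pv_count_closed exercises rest (n + (pvGetPrimary exercises e).length)
      rw [← hupd] at h2
      symm
      rw [beq_eq_false_iff_ne]
      omega

-- ===== VERDICT (by name: the statement is the Claim_ definition above) =====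
theorem is_non_synergistic_spec : Claim_equal_is_non_synergistic := by
  intro ss ex _ _
  unfold Spec_is_non_synergistic is_non_synergistic is_non_synergistic_alt
  exact (pv_main ex ss PySem.Set.empty 0 rfl).symm
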